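-- pv_equiv track=rewrite | github.com/codder-cc/skylator | translator/web/routes/mods.py | _scope_counts
-- ===== SOURCE A (Python) =====
-- def _scope_counts(strings: list) -> dict:
--     non_esp = ("mcm:", "bsa-mcm:", "swf:")
--     return {
--         "all":    len(strings),
--         "esp":    sum(1 for s in strings if not any(s["key"].startswith(p) for p in non_esp)),
--         "mcm":    sum(1 for s in strings if s["key"].startswith("mcm:")),
--         "bsa":    sum(1 for s in strings if s["key"].startswith("bsa-mcm:")),
--         "swf":    sum(1 for s in strings if s["key"].startswith("swf:")),
--         "review": sum(1 for s in strings if s["status"] == "needs_review"),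
--     }
-- ===== SOURCE B (Python) =====
-- def _scope_counts(strings: list) -> dict:
--     counts = {"all": len(strings), "esp": 0, "mcm": 0,
--               "bsa": 0, "swf": 0, "review": 0}
--     for s in strings:
--         key = s["key"]
--         m1 = key.startswith("mcm:")
--         m2 = key.startswith("bsa-mcm:")
--         m3 = key.startswith("swf:")
--         if m1:
--             counts["mcm"] += 1
--         if m2:
--             counts["bsa"] += 1
--         if m3:
--             counts["swf"] += 1
--         if not (m1 or m2 or m3):
--             counts["esp"] += 1
--         if s["status"] == "needs_review":
--             counts["review"] += 1
--     return counts
-- ===== Notes on version B (the rewrite author's own statement) =====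
-- stated objective: alternative
-- what changed: Replaces A's five separate generator-expression scans over strings with one accumulating loop that classifies each element once.
import Mathlib
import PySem

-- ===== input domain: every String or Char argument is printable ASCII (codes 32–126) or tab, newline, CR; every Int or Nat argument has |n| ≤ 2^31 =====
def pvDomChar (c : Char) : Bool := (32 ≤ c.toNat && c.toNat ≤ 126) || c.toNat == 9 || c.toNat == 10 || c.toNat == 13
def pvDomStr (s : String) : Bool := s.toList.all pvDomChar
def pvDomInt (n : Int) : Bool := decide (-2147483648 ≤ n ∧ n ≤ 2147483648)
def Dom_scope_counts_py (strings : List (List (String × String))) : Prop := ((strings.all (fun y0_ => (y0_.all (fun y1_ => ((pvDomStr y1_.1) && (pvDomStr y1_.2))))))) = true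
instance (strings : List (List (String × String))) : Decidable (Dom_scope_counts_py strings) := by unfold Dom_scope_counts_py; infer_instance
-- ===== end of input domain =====

-- B replaces A's five separate scans of the list with one accumulating pass; return value only.

-- ===== PORT A =====
-- s[k] for the assoc-list dict (first match); Pre_ guarantees the key is present, so the default is never used
def pvGetS (s : List (String × String)) (k : String) : String := (List.lookup k s).getD ""

-- sum(1 for s in strings if p s)
def pvCount (strings : List (List (String × String))) (p : List (String × String) → Bool) : Int :=
  strings.foldl (fun acc s => if p s then acc + 1 else acc) 0

def scope_counts_py (strings : List (List (String × String))) : List (String × Int) :=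
  [("all", (strings.length : Int)),
   ("esp", pvCount strings (fun s => !(["mcm:", "bsa-mcm:", "swf:"].any (fun p => PySem.Str.startswith (pvGetS s "key") p)))),
   ("mcm", pvCount strings (fun s => PySem.Str.startswith (pvGetS s "key") "mcm:")),
   ("bsa", pvCount strings (fun s => PySem.Str.startswith (pvGetS s "key") "bsa-mcm:")),
   ("swf", pvCount strings (fun s => PySem.Str.startswith (pvGetS s "key") "swf:")),
   ("review", pvCount strings (fun s => pvGetS s "status" == "needs_review"))]

-- ===== PORT B =====
-- one loop step: state (esp, mcm, bsa, swf, review)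
def pvBStep (c : Int × Int × Int × Int × Int) (s : List (String × String)) : Int × Int × Int × Int × Int :=
  match c with
  | (e, m, b, w, r) =>
    let key := pvGetS s "key"
    let m1 := PySem.Str.startswith key "mcm:"
    let m2 := PySem.Str.startswith key "bsa-mcm:"
    let m3 := PySem.Str.startswith key "swf:"
    (e + (if !(m1 || m2 || m3) then 1 else 0),
     m + (if m1 then 1 else 0),
     b + (if m2 then 1 else 0),
     w + (if m3 then 1 else 0),
     r + (if pvGetS s "status" == "needs_review" then 1 else 0))

def scope_counts_py_alt (strings : List (List (String × String))) : List (String × Int) :=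
  let c := strings.foldl pvBStep (0, 0, 0, 0, 0)
  [("all", (strings.length : Int)),
   ("esp", c.1), ("mcm", c.2.1), ("bsa", c.2.2.1), ("swf", c.2.2.2.1), ("review", c.2.2.2.2)]

-- ===== PRECONDITION & SPEC =====
-- A raises KeyError on any element dict lacking "key" or "status"; Pre_ excludes exactly those.
def Pre_scope_counts_py (strings : List (List (String × String))) : Prop :=
  (strings.all (fun s => s.any (fun p => p.1 == "key") && s.any (fun p => p.1 == "status"))) = true
instance (strings : List (List (String × String))) : Decidable (Pre_scope_counts_py strings) := by unfold Pre_scope_counts_py; infer_instance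
def pvWitness_scope_counts_py : (List (List (String × String))) :=
  [[("key", "mcm:x"), ("status", "needs_review")]]

def Spec_scope_counts_py (strings : List (List (String × String))) (out : List (String × Int)) : Prop := out = scope_counts_py_alt strings
instance (strings : List (List (String × String))) (out : List (String × Int)) : Decidable (Spec_scope_counts_py strings out) := by unfold Spec_scope_counts_py; infer_instance

-- ===== CLAIM (what is proved, stated in full; the proofs are below) =====
def Claim_equal_scope_counts_py : Prop := ∀ (strings : List (List (String × String))), Dom_scope_counts_py strings → Pre_scope_counts_py strings → Spec_scope_counts_py strings (scope_counts_py strings)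

-- ===== LEMMAS AND PROOFS =====
theorem pvCount_acc (p : List (String × String) → Bool) (l : List (List (String × String))) :
    ∀ a : Int, l.foldl (fun acc s => if p s then acc + 1 else acc) a = a + pvCount l p := by
  induction l with
  | nil => intro a; simp [pvCount]
  | cons s t ih =>
    intro a
    simp only [pvCount, List.foldl_cons] at *
    rw [ih, ih (if p s then (0:Int) + 1 else 0)]
    split_ifs <;> omega

theorem pvCount_cons (p : List (String × String) → Bool) (s : List (String × String)) (t : List (List (String × String))) :
    pvCount (s :: t) p = (if p s then 1 else 0) + pvCount t p := by
  simp only [pvCount, List.foldl_cons]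
  rw [pvCount_acc]
  simp only [pvCount]
  split_ifs <;> omega

theorem pvBfold (l : List (List (String × String))) :
    ∀ e m b w r : Int, l.foldl pvBStep (e, m, b, w, r) =
      (e + pvCount l (fun s => !(["mcm:", "bsa-mcm:", "swf:"].any (fun p => PySem.Str.startswith (pvGetS s "key") p))),
       m + pvCount l (fun s => PySem.Str.startswith (pvGetS s "key") "mcm:"),
       b + pvCount l (fun s => PySem.Str.startswith (pvGetS s "key") "bsa-mcm:"),
       w + pvCount l (fun s => PySem.Str.startswith (pvGetS s "key") "swf:"),
       r + pvCount l (fun s => pvGetS s "status" == "needs_review")) := by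
  induction l with
  | nil => intro e m b w r; simp [pvCount]
  | cons s t ih =>
    intro e m b w r
    simp only [List.foldl_cons, pvBStep, ih, pvCount_cons]
    refine Prod.ext ?_ (Prod.ext ?_ (Prod.ext ?_ (Prod.ext ?_ ?_))) <;> simp <;> split_ifs <;>
      first
        | omega
        | tauto

-- ===== VERDICT (by name: the statement is the Claim_ definition above) =====
theorem scope_counts_py_spec : Claim_equal_scope_counts_py := by
  intro strings _ _
  unfold Spec_scope_counts_py scope_counts_py scope_counts_py_alt
  rw [pvBfold]
  simp
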